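-- pv_equiv track=rewrite | github.com/ian-bda/exonerate_map_sequences | overlap_exonerate_analysis.py | cluster_regions
-- ===== SOURCE A (Python) =====
-- def regions_overlap(r1, r2):
--     return r1[1] == r2[1] and not (r1[3] < r2[2] or r2[3] < r1[2])
--
-- def cluster_regions(regions):
--     clusters = []
--     for region in regions:
--         placed = False
--         for cluster in clusters:
--             if any(regions_overlap(region, member) for member in cluster):
--                 cluster.append(region)
--                 placed = True
--                 break
--         if not placed:
--             clusters.append([region])
--     return clusters
-- ===== SOURCE B (Python) =====
-- def cluster_regions(regions):
--     # Different strategy: no scan over clusters at all. Every placed region is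
--     # recorded once, per key, as (start, end, cluster_id); a new region joins the
--     # cluster of MINIMUM id among all recorded same-key entries whose interval
--     # overlaps it, or opens a new cluster if none overlaps. This equals A's
--     # "first cluster containing an overlapping member" rule because cluster ids
--     # are assigned in creation order.
--     clusters = []
--     members = {}  # key -> flat list of (start, end, cluster_id)
--     for region in regions:
--         key, s, e = region[1], region[2], region[3]
--         lst = members.setdefault(key, [])
--         cid = min((c for (a, b, c) in lst if a <= e and s <= b), default=None)
--         if cid is None:
--             cid = len(clusters)
--             clusters.append([region])
--         else:
--             clusters[cid].append(region)
--         lst.append((s, e, cid))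
--     return clusters
-- ===== Notes on version B (the rewrite author's own statement) =====
-- stated objective: alternative
-- what changed: B eliminates A's scan over clusters entirely: it keeps one flat per-key list of (start, end, cluster_id) entries and assigns each region to the minimum cluster id among overlapping same-key entries (new cluster if none), proved equal to A's first-overlapping-cluster rule since ids follow creation order.
import Mathlib
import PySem

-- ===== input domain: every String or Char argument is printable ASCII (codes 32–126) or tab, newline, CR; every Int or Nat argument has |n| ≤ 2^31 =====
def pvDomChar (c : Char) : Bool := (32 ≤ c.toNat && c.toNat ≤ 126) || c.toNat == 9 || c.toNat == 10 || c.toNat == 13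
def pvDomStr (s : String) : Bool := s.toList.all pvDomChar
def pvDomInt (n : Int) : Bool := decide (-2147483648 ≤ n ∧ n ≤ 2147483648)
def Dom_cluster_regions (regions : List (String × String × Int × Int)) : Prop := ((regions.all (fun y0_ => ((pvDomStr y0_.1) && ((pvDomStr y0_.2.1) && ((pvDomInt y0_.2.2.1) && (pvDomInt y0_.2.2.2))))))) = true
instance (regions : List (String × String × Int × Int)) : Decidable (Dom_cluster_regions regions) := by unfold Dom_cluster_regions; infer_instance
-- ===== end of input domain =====

-- B drops A's scan over clusters: it records every placed region per key as
-- (start, end, cluster_id) and assigns a region to the MINIMUM cluster id among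
-- overlapping same-key entries (new cluster if none), which equals A's
-- first-overlapping-cluster rule since ids follow creation order (objective: alternative).

-- ===== PORT A =====
def regionsOverlap (r1 r2 : String × String × Int × Int) : Bool :=
  r1.2.1 == r2.2.1 && !(decide (r1.2.2.2 < r2.2.2.1) || decide (r2.2.2.2 < r1.2.2.1))

-- inner 'for cluster in clusters: … break' with in-place append, as a recursion
def placeA (region : String × String × Int × Int) :
    List (List (String × String × Int × Int)) → Option (List (List (String × String × Int × Int)))
  | [] => none
  | c :: cs =>
    if c.any (fun member => regionsOverlap region member) then
      some ((c ++ [region]) :: cs)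
    else
      (placeA region cs).map (fun cs' => c :: cs')

def stepA (clusters : List (List (String × String × Int × Int)))
    (region : String × String × Int × Int) : List (List (String × String × Int × Int)) :=
  match placeA region clusters with
  | some clusters' => clusters'
  | none => clusters ++ [[region]]

def cluster_regions (regions : List (String × String × Int × Int)) : List (List (String × String × Int × Int)) :=
  regions.foldl stepA []

-- ===== PORT B =====
-- one loop iteration of Source B: flat per-key member list, min cluster id among overlaps
def stepB (st : List (List (String × String × Int × Int)) × PySem.Dict String (List (Int × Int × Nat)))
    (region : String × String × Int × Int) :
    List (List (String × String × Int × Int)) × PySem.Dict String (List (Int × Int × Nat)) :=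
  let key := region.2.1
  let s := region.2.2.1
  let e := region.2.2.2
  let lst := st.2.getD key []
  let cands := lst.filterMap (fun t => if decide (t.1 ≤ e) && decide (s ≤ t.2.1) then some t.2.2 else none)
  match PySem.List.min? cands (fun x => x) with
  | none =>
      let cid := st.1.length
      (st.1 ++ [[region]], st.2.insert key (lst ++ [(s, e, cid)]))
  | some cid =>
      (st.1.set cid (st.1.getD cid [] ++ [region]), st.2.insert key (lst ++ [(s, e, cid)]))

def cluster_regions_alt (regions : List (String × String × Int × Int)) : List (List (String × String × Int × Int)) :=
  (regions.foldl stepB ([], PySem.Dict.empty)).1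

-- ===== PRECONDITION & SPEC =====
def Spec_cluster_regions (regions : List (String × String × Int × Int)) (out : List (List (String × String × Int × Int))) : Prop := out = cluster_regions_alt regions
instance (regions : List (String × String × Int × Int)) (out : List (List (String × String × Int × Int))) : Decidable (Spec_cluster_regions regions out) := by unfold Spec_cluster_regions; infer_instance

-- ===== CLAIM (what is proved, stated in full; the proofs are below) =====
def Claim_equal_cluster_regions : Prop := ∀ (regions : List (String × String × Int × Int)), Dom_cluster_regions regions → Spec_cluster_regions regions (cluster_regions regions)

-- ===== LEMMAS AND PROOFS =====

-- the per-key member lists of B, specified from A's cluster list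
def BInv (d : PySem.Dict String (List (Int × Int × Nat)))
    (clusters : List (List (String × String × Int × Int))) : Prop :=
  ∀ (k : String) (t : Int × Int × Nat),
    t ∈ d.getD k [] ↔
      t.2.2 < clusters.length ∧
        ∃ r ∈ clusters.getD t.2.2 [], r.2.1 = k ∧ r.2.2.1 = t.1 ∧ r.2.2.2 = t.2.1

lemma placeA_eq_none (region : String × String × Int × Int) :
    ∀ clusters : List (List (String × String × Int × Int)),
      (∀ c ∈ clusters, c.any (fun member => regionsOverlap region member) = false) →
      placeA region clusters = none := by
  intro clusters
  induction clusters with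
  | nil => intro _; rfl
  | cons c cs ih =>
    intro h
    simp [placeA, h c (List.mem_cons_self ..), ih (fun c' hc' => h c' (List.mem_cons_of_mem _ hc'))]

lemma placeA_eq_some (region : String × String × Int × Int) :
    ∀ (clusters : List (List (String × String × Int × Int))) (j : Nat),
      j < clusters.length →
      (clusters.getD j []).any (fun member => regionsOverlap region member) = true →
      (∀ i : Nat, i < j → (clusters.getD i []).any (fun member => regionsOverlap region member) = false) →
      placeA region clusters = some (clusters.set j (clusters.getD j [] ++ [region])) := by
  intro clusters
  induction clusters with
  | nil => intro j hj; simp at hj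
  | cons c cs ih =>
    intro j hj hov hleast
    cases j with
    | zero =>
      simp only [List.getD_cons_zero] at hov
      simp [placeA, hov]
    | succ j =>
      have h0 : c.any (fun member => regionsOverlap region member) = false := by
        simpa using hleast 0 (Nat.succ_pos j)
      simp only [List.getD_cons_succ] at hov
      rw [List.getD_cons_succ, List.set_cons_succ]
      have := ih j (by simpa using Nat.lt_of_succ_lt_succ hj) hov
        (fun i hi => by simpa using hleast (i + 1) (Nat.succ_lt_succ hi))
      simp [placeA, h0, this]

lemma getD_set_list {α : Type} (l : List α) (j : Nat) (v : α) (c : Nat) (d : α) :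
    (l.set j v).getD c d = if c = j ∧ j < l.length then v else l.getD c d := by
  split_ifs with h
  · obtain ⟨rfl, hj⟩ := h
    rw [List.getD_eq_getElem _ _ (by simpa using hj), List.getElem_set_self]
  · by_cases hc : c < l.length
    · rw [List.getD_eq_getElem _ _ (by simpa using hc), List.getD_eq_getElem _ _ hc]
      have : c ≠ j := fun hcj => h ⟨hcj, hcj ▸ hc⟩
      simp [this.symm]
    · rw [List.getD_eq_default _ _ (by simpa using Nat.le_of_not_lt hc),
        List.getD_eq_default _ _ (Nat.le_of_not_lt hc)]

-- membership in B's candidate list = "cluster m contains an overlapping member"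
lemma mem_cands (region : String × String × Int × Int)
    (d : PySem.Dict String (List (Int × Int × Nat)))
    (clusters : List (List (String × String × Int × Int))) (hinv : BInv d clusters) (m : Nat) :
    m ∈ (d.getD region.2.1 []).filterMap
        (fun t => if decide (t.1 ≤ region.2.2.2) && decide (region.2.2.1 ≤ t.2.1) then some t.2.2 else none)
      ↔ m < clusters.length ∧
          (clusters.getD m []).any (fun member => regionsOverlap region member) = true := by
  rw [List.mem_filterMap]
  constructor
  · rintro ⟨t, ht, hcond⟩
    split_ifs at hcond with hov
    · injection hcond with hm
      subst hm
      obtain ⟨hlen, r, hr, hk, hs, he⟩ := (hinv region.2.1 t).1 ht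
      refine ⟨hlen, ?_⟩
      rw [List.any_eq_true]
      refine ⟨r, hr, ?_⟩
      simp only [regionsOverlap, hk, beq_self_eq_true, Bool.true_and, hs, he]
      simp only [Bool.and_eq_true, decide_eq_true_eq] at hov
      simp
      omega
  · rintro ⟨hlen, hov⟩
    rw [List.any_eq_true] at hov
    obtain ⟨r, hr, hrov⟩ := hov
    simp only [regionsOverlap, Bool.and_eq_true, beq_iff_eq] at hrov
    obtain ⟨hk, hiv⟩ := hrov
    refine ⟨(r.2.2.1, r.2.2.2, m), (hinv region.2.1 _).2 ⟨hlen, r, hr, hk.symm, rfl, rfl⟩, ?_⟩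
    simp only [Bool.not_eq_eq_eq_not, Bool.not_true, Bool.or_eq_false_iff, decide_eq_false_iff_not,
      Int.not_lt] at hiv
    simp [hiv.1, hiv.2]

lemma inv_found (region : String × String × Int × Int)
    (d : PySem.Dict String (List (Int × Int × Nat)))
    (clusters : List (List (String × String × Int × Int))) (hinv : BInv d clusters)
    (cid : Nat) (hcid : cid < clusters.length) :
    BInv (d.insert region.2.1 (d.getD region.2.1 [] ++ [(region.2.2.1, region.2.2.2, cid)]))
      (clusters.set cid (clusters.getD cid [] ++ [region])) := by
  intro k t
  rw [PySem.Dict.getD_insert]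
  have hlen : (clusters.set cid (clusters.getD cid [] ++ [region])).length = clusters.length := by
    simp
  rw [hlen]
  have hget : ∀ c : Nat, (clusters.set cid (clusters.getD cid [] ++ [region])).getD c []
      = if c = cid ∧ cid < clusters.length then clusters.getD cid [] ++ [region]
        else clusters.getD c [] := fun c => getD_set_list clusters cid _ c []
  constructor
  · intro ht
    split_ifs at ht with hk
    · subst hk
      rcases List.mem_append.1 ht with ht | ht
      · obtain ⟨h1, r, hr, hprop⟩ := (hinv region.2.1 t).1 ht
        refine ⟨h1, r, ?_, hprop⟩
        rw [hget]
        split_ifs with hc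
        · exact List.mem_append_left _ (hc.1 ▸ hr)
        · exact hr
      · simp only [List.mem_singleton] at ht
        subst ht
        refine ⟨hcid, region, ?_, rfl, rfl, rfl⟩
        rw [hget]
        simp [hcid]
    · obtain ⟨h1, r, hr, hprop⟩ := (hinv k t).1 ht
      refine ⟨h1, r, ?_, hprop⟩
      rw [hget]
      split_ifs with hc
      · exact List.mem_append_left _ (hc.1 ▸ hr)
      · exact hr
  · rintro ⟨h1, r, hr, hprop⟩
    rw [hget] at hr
    split_ifs at hr with hc
    · rcases List.mem_append.1 hr with hr | hr
      · have := (hinv k t).2 ⟨h1, r, hc.1 ▸ hr, hprop⟩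
        split_ifs with hk
        · exact List.mem_append_left _ (hk ▸ this)
        · exact this
      · -- r = region, t.2.2 = cid
        simp only [List.mem_singleton] at hr
        subst hr
        obtain ⟨hk, hs, he⟩ := hprop
        rw [if_pos hk.symm]
        apply List.mem_append_right
        obtain ⟨t1, t2, t3⟩ := t
        have : (t1, t2, t3) = (r.2.2.1, r.2.2.2, cid) := by
          simp only [Prod.mk.injEq]
          exact ⟨hs.symm, he.symm, hc.1⟩
        rw [this]
        exact List.mem_singleton_self _
    · have := (hinv k t).2 ⟨h1, r, hr, hprop⟩
      split_ifs with hk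
      · exact List.mem_append_left _ (hk ▸ this)
      · exact this

lemma inv_new (region : String × String × Int × Int)
    (d : PySem.Dict String (List (Int × Int × Nat)))
    (clusters : List (List (String × String × Int × Int))) (hinv : BInv d clusters) :
    BInv (d.insert region.2.1 (d.getD region.2.1 [] ++ [(region.2.2.1, region.2.2.2, clusters.length)]))
      (clusters ++ [[region]]) := by
  intro k t
  rw [PySem.Dict.getD_insert]
  have hget : ∀ c : Nat, c < clusters.length → (clusters ++ [[region]]).getD c [] = clusters.getD c [] := by
    intro c hc
    rw [List.getD_eq_getElem _ _ (by simp; omega), List.getD_eq_getElem _ _ hc,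
      List.getElem_append_left hc]
  have hgetN : (clusters ++ [[region]]).getD clusters.length [] = [region] := by
    rw [List.getD_eq_getElem _ _ (by simp)]
    simp
  constructor
  · intro ht
    split_ifs at ht with hk
    · subst hk
      rcases List.mem_append.1 ht with ht | ht
      · obtain ⟨h1, r, hr, hprop⟩ := (hinv region.2.1 t).1 ht
        exact ⟨by simp; omega, r, (hget _ h1).symm ▸ hr, hprop⟩
      · simp only [List.mem_singleton] at ht
        subst ht
        exact ⟨by simp, region, by rw [hgetN]; simp, rfl, rfl, rfl⟩
    · obtain ⟨h1, r, hr, hprop⟩ := (hinv k t).1 ht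
      exact ⟨by simp; omega, r, (hget _ h1).symm ▸ hr, hprop⟩
  · rintro ⟨h1, r, hr, hprop⟩
    simp only [List.length_append, List.length_cons, List.length_nil] at h1
    by_cases hc : t.2.2 < clusters.length
    · rw [hget _ hc] at hr
      have := (hinv k t).2 ⟨hc, r, hr, hprop⟩
      split_ifs with hk
      · exact List.mem_append_left _ (hk ▸ this)
      · exact this
    · have hceq : t.2.2 = clusters.length := by omega
      rw [hceq, hgetN] at hr
      simp only [List.mem_singleton] at hr
      subst hr
      obtain ⟨hk, hs, he⟩ := hprop
      rw [if_pos hk.symm]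
      apply List.mem_append_right
      obtain ⟨t1, t2, t3⟩ := t
      have : (t1, t2, t3) = (r.2.2.1, r.2.2.2, clusters.length) := by
        simp only [Prod.mk.injEq]
        exact ⟨hs.symm, he.symm, hceq⟩
      rw [this]
      exact List.mem_singleton_self _

lemma step_correct (clusters : List (List (String × String × Int × Int)))
    (d : PySem.Dict String (List (Int × Int × Nat)))
    (region : String × String × Int × Int) (hinv : BInv d clusters) :
    (stepB (clusters, d) region).1 = stepA clusters region ∧
      BInv (stepB (clusters, d) region).2 (stepB (clusters, d) region).1 := by
  have hmem := mem_cands region d clusters hinv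
  set cands := (d.getD region.2.1 []).filterMap
    (fun t => if decide (t.1 ≤ region.2.2.2) && decide (region.2.2.1 ≤ t.2.1) then some t.2.2 else none) with hcands
  match hmin : PySem.List.min? cands (fun x => x) with
  | none =>
      have hempty : cands = [] := (PySem.List.min?_eq_none_iff _ _).1 hmin
      have hnone : placeA region clusters = none := by
        apply placeA_eq_none
        intro c hc
        by_contra hany
        obtain ⟨i, hi, hci⟩ := List.mem_iff_getElem.1 hc
        have : i ∈ cands := (hmem i).2 ⟨hi, by
          rw [List.getD_eq_getElem _ _ hi, hci]
          simpa using hany⟩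
        rw [hempty] at this
        exact absurd this (List.not_mem_nil)
      have hstep : stepB (clusters, d) region
          = (clusters ++ [[region]],
             d.insert region.2.1 (d.getD region.2.1 [] ++ [(region.2.2.1, region.2.2.2, clusters.length)])) := by
        simp only [stepB, ← hcands, hmin]
      refine ⟨by simp [hstep, stepA, hnone], ?_⟩
      rw [hstep]
      exact inv_new region d clusters hinv
  | some m =>
      have hm : m ∈ cands := PySem.List.min?_mem hmin
      have hmmin : ∀ y ∈ cands, m ≤ y := by
        intro y hy
        exact PySem.List.min?_isMin hmin y hy
      obtain ⟨hmlen, hmov⟩ := (hmem m).1 hm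
      have hsome : placeA region clusters = some (clusters.set m (clusters.getD m [] ++ [region])) := by
        apply placeA_eq_some region clusters m hmlen hmov
        intro i hi
        by_contra hov
        have hiov : (clusters.getD i []).any (fun member => regionsOverlap region member) = true := by
          simpa using hov
        have : i ∈ cands := (hmem i).2 ⟨Nat.lt_trans hi hmlen, hiov⟩
        exact absurd hi (Nat.not_lt.2 (hmmin i this))
      have hstep : stepB (clusters, d) region
          = (clusters.set m (clusters.getD m [] ++ [region]),
             d.insert region.2.1 (d.getD region.2.1 [] ++ [(region.2.2.1, region.2.2.2, m)])) := by
        simp only [stepB, ← hcands, hmin]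
      refine ⟨by simp [hstep, stepA, hsome], ?_⟩
      rw [hstep]
      exact inv_found region d clusters hinv m hmlen

lemma fold_eq : ∀ (regions : List (String × String × Int × Int))
    (clusters : List (List (String × String × Int × Int)))
    (d : PySem.Dict String (List (Int × Int × Nat))),
    BInv d clusters →
    (regions.foldl stepB (clusters, d)).1 = regions.foldl stepA clusters := by
  intro regions
  induction regions with
  | nil => intro clusters d _; rfl
  | cons r rs ih =>
    intro clusters d hinv
    obtain ⟨h1, h2⟩ := step_correct clusters d r hinv
    simp only [List.foldl_cons]
    have heq : stepB (clusters, d) r = ((stepB (clusters, d) r).1, (stepB (clusters, d) r).2) := rfl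
    rw [heq, ih _ _ h2, h1]

-- ===== VERDICT (by name: the statement is the Claim_ definition above) =====
theorem cluster_regions_spec : Claim_equal_cluster_regions := by
  intro regions _
  unfold Spec_cluster_regions cluster_regions cluster_regions_alt
  exact (fold_eq regions [] PySem.Dict.empty (by intro k t; simp)).symm
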